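-- pv_equiv track=rewrite | github.com/Sukyn/EulerProject | 0 to 100/0051.py | unrank
-- ===== SOURCE A (Python) =====
-- def unrank(s, i):
--     ''' Generates all subsets of s
--     (useful to check for multiple digits)'''
--     if s == []: # If s is empty, [] is the only subset
--         return []
--     s0 = s.pop(0)
--     if i >= 2**len(s):
--         return [s0] + unrank(s, i-2**len(s))
--     else:
--         return unrank(s, i)
-- ===== SOURCE B (Python) =====
-- def unrank(s, i):
--     # Iterative accumulator version of the recursive MSB-first subset unranking.
--     # Like A, it empties the argument list s in place (same observable mutation).
--     res = []
--     while s: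
--         s0 = s.pop(0)
--         t = 2 ** len(s)
--         if i >= t:
--             res.append(s0)
--             i -= t
--     return res
-- ===== Notes on version B (the rewrite author's own statement) =====
-- stated objective: alternative
-- what changed: Replaced the self-recursive definition that builds the result by prepending ([s0] + recursive call) with an explicit while-loop that pops the front element and appends selected elements to an accumulator list, returning it at the end.
import Mathlib
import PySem

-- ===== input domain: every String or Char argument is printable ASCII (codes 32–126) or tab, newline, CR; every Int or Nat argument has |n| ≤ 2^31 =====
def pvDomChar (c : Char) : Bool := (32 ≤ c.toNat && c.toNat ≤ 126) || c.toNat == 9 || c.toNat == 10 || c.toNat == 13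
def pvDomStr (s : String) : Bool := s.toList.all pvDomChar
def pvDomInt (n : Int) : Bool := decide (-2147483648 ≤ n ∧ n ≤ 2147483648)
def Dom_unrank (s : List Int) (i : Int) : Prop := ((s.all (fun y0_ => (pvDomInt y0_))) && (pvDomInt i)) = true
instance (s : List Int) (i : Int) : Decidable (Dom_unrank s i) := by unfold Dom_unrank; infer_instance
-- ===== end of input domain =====

-- B replaces A's recursion (prepend + recursive call) by an explicit loop with an
-- appended accumulator; equivalence of RETURN values (both Pythons empty s in place).

-- ===== PORT A =====
-- A: recursive; pop(0) = split head/rest, threshold 2^len(rest), prepend s0 when i ≥ threshold.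
def unrank (s : List Int) (i : Int) : List Int :=
  match s with
  | [] => []
  | s0 :: rest =>
    if i ≥ (2 : Int) ^ rest.length then
      [s0] ++ unrank rest (i - (2 : Int) ^ rest.length)
    else
      unrank rest i

-- ===== PORT B =====
-- B: loop over s carrying (i, res); res.append = acc ++ [s0].
def unrankAltGo (s : List Int) (i : Int) (res : List Int) : List Int :=
  match s with
  | [] => res
  | s0 :: rest =>
    let t : Int := (2 : Int) ^ rest.length
    if i ≥ t then unrankAltGo rest (i - t) (res ++ [s0])
    else unrankAltGo rest i res

def unrank_alt (s : List Int) (i : Int) : List Int := unrankAltGo s i []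

-- ===== PRECONDITION & SPEC =====
def Spec_unrank (s : List Int) (i : Int) (out : List Int) : Prop := out = unrank_alt s i
instance (s : List Int) (i : Int) (out : List Int) : Decidable (Spec_unrank s i out) := by unfold Spec_unrank; infer_instance

-- ===== CLAIM (what is proved, stated in full; the proofs are below) =====
def Claim_equal_unrank : Prop := ∀ (s : List Int) (i : Int), Dom_unrank s i → Spec_unrank s i (unrank s i)

-- ===== LEMMAS AND PROOFS =====
theorem unrankAltGo_eq (s : List Int) (i : Int) (res : List Int) :
    unrankAltGo s i res = res ++ unrank s i := by
  induction s generalizing i res with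
  | nil => simp [unrankAltGo, unrank]
  | cons s0 rest ih =>
    simp only [unrankAltGo, unrank]
    split_ifs with h
    · rw [ih]; simp
    · rw [ih]

-- ===== VERDICT (by name: the statement is the Claim_ definition above) =====
theorem unrank_spec : Claim_equal_unrank := by
  intro s i _
  unfold Spec_unrank unrank_alt
  rw [unrankAltGo_eq]; simp
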